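-- pv_equiv track=rewrite | github.com/FlechazoLiu/Ai_Python_course | exercise/total_ascend.py | total_ascend
-- ===== SOURCE A (Python) =====
-- def total_ascend(h):
--     count = 0
--     x = 0
--     l = len(h)
--     while x < l:
--         j = 1
--         while x+j < l:
--             if h[x+j-1] < h[x+j]:
--                 j += 1
--             else:
--                 break
--         if j != 1:
--             count += 1
--         x += j
--     return count
-- ===== SOURCE B (Python) =====
-- def total_ascend(h):
--     count = 0
--     in_run = False
--     for i in range(1, len(h)):
--         if h[i - 1] < h[i]:
--             if not in_run:
--                 count += 1
--             in_run = True
--         else: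
--             in_run = False
--     return count
-- ===== Notes on version B (the rewrite author's own statement) =====
-- stated objective: simpler
-- what changed: Replaced A's nested while loops that jump over each maximal ascending run by a single flat pass over adjacent pairs with an in_run flag that counts each run once.
import Mathlib
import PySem

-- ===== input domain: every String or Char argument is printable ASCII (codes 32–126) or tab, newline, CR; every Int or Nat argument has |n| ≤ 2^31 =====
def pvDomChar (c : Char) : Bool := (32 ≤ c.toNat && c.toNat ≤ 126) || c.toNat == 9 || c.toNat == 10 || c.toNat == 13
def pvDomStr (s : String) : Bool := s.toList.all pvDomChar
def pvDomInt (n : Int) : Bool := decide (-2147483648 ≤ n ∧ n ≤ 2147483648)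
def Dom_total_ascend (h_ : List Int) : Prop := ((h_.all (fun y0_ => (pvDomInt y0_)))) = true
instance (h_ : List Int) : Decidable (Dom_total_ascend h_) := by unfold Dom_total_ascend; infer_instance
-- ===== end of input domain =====

-- B replaces A's nested run-jumping while loops by one flat pass over adjacent
-- pairs with an in_run flag (objective: simpler).

-- ===== PORT A =====
-- inner while loop: j = 1; while x+j < l: if h[x+j-1] < h[x+j]: j += 1 else break
-- (indices are Nat: every access is guarded by x+j < l, so it is in range and exact)
def innerA (h : List Int) (l x : Nat) (j : Nat) : Nat :=
  if x + j < l ∧ h.getD (x + j - 1) 0 < h.getD (x + j) 0 then innerA h l x (j + 1)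
  else j
termination_by l - (x + j)

theorem innerA_ge (h : List Int) (l x : Nat) : ∀ j, j ≤ innerA h l x j := by
  intro j
  induction j using innerA.induct h l x with
  | case1 j hc ih => rw [innerA, if_pos hc]; omega
  | case2 j hc => rw [innerA, if_neg hc]

-- outer while loop, threading count
def outerA (h : List Int) (l : Nat) (count : Int) (x : Nat) : Int :=
  if x < l then
    let j := innerA h l x 1
    outerA h l (if j ≠ 1 then count + 1 else count) (x + j)
  else count
termination_by l - x
decreasing_by have := innerA_ge h l x 1; omega

def total_ascend (h_ : List Int) : Int := outerA h_ h_.length 0 0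

-- ===== PORT B =====
-- single pass: for i in range(1, len(h)) with an in_run flag
def bLoop (h : List Int) (l : Nat) (i : Nat) (count : Int) (inRun : Bool) : Int :=
  if i < l then
    if h.getD (i - 1) 0 < h.getD i 0 then
      bLoop h l (i + 1) (if inRun then count else count + 1) true
    else
      bLoop h l (i + 1) count false
  else count
termination_by l - i

def total_ascend_alt (h_ : List Int) : Int := bLoop h_ h_.length 1 0 false

-- ===== PRECONDITION & SPEC =====
def Spec_total_ascend (h_ : List Int) (out : Int) : Prop := out = total_ascend_alt h_
instance (h_ : List Int) (out : Int) : Decidable (Spec_total_ascend h_ out) := by unfold Spec_total_ascend; infer_instance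

-- ===== CLAIM (what is proved, stated in full; the proofs are below) =====
def Claim_equal_total_ascend : Prop := ∀ (h_ : List Int), Dom_total_ascend h_ → Spec_total_ascend h_ (total_ascend h_)

-- ===== LEMMAS AND PROOFS =====

-- While inside a run (inRun = true), B neither counts nor stops until the run
-- ends at x + innerA h l x j; then it takes one non-ascending step (if any).
theorem bLoop_run (h : List Int) (l x : Nat) :
    ∀ j c, 1 ≤ j →
      bLoop h l (x + j) c true =
        (if x + innerA h l x j < l then bLoop h l (x + innerA h l x j + 1) c false
         else c) := by
  intro j c hj
  induction j using innerA.induct h l x generalizing c with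
  | case1 j hc ih =>
    rw [innerA, if_pos hc]
    rw [bLoop, if_pos hc.1]
    rw [if_pos hc.2, if_pos rfl]
    have := ih c (by omega)
    simpa [Nat.add_assoc] using this
  | case2 j hc =>
    rw [innerA, if_neg hc]
    by_cases hl : x + j < l
    · have hlt : ¬ h.getD (x + j - 1) 0 < h.getD (x + j) 0 := by
        intro hlt; exact hc ⟨hl, hlt⟩
      rw [bLoop, if_pos hl, if_neg hlt, if_pos hl]
    · rw [bLoop, if_neg hl, if_neg hl]

-- Main invariant: B resumed at x+1 with in_run = false computes c + (A's count from x).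
theorem main_inv (h : List Int) (l : Nat) :
    ∀ n x c, l - x ≤ n → bLoop h l (x + 1) c false = outerA h l c x := by
  intro n
  induction n with
  | zero =>
    intro x c hn
    have hx : ¬ x < l := by omega
    rw [outerA, if_neg hx, bLoop, if_neg (by omega)]
  | succ n ih =>
    intro x c hn
    by_cases hx : x < l
    · rw [outerA, if_pos hx]
      show bLoop h l (x + 1) c false
          = outerA h l (if innerA h l x 1 ≠ 1 then c + 1 else c) (x + innerA h l x 1)
      by_cases hasc : x + 1 < l ∧ h.getD x 0 < h.getD (x + 1) 0
      · -- run of length ≥ 2 starts at x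
        have hj2 : innerA h l x 1 = innerA h l x 2 := by
          rw [innerA]
          simp only [show x + 1 - 1 = x from rfl]
          rw [if_pos hasc]
        have hge : 2 ≤ innerA h l x 1 := by
          rw [hj2]; exact innerA_ge h l x 2
        rw [bLoop, if_pos hasc.1]
        simp only [show x + 1 - 1 = x from rfl]
        rw [if_pos hasc.2]
        simp only [Bool.false_eq_true, if_false]
        have hrun := bLoop_run h l x 2 (c + 1) (by omega)
        have h11 : x + 1 + 1 = x + 2 := by omega
        rw [h11, hrun, ← hj2]
        rw [if_pos (by omega : innerA h l x 1 ≠ 1)]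
        by_cases hend : x + innerA h l x 1 < l
        · rw [if_pos hend]
          exact ih (x + innerA h l x 1) (c + 1) (by omega)
        · rw [if_neg hend, outerA, if_neg hend]
      · -- no run starts at x: innerA h l x 1 = 1
        have hj1 : innerA h l x 1 = 1 := by
          rw [innerA]
          simp only [show x + 1 - 1 = x from rfl]
          rw [if_neg hasc]
        rw [hj1]
        simp only [ne_eq, not_true_eq_false, if_false]
        by_cases hl1 : x + 1 < l
        · have hlt : ¬ h.getD (x + 1 - 1) 0 < h.getD (x + 1) 0 := by
            simp only [show x + 1 - 1 = x from rfl]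
            intro hlt; exact hasc ⟨hl1, hlt⟩
          rw [bLoop, if_pos hl1, if_neg hlt]
          exact ih (x + 1) c (by omega)
        · rw [bLoop, if_neg hl1, outerA, if_neg hl1]
    · rw [outerA, if_neg hx, bLoop, if_neg (by omega)]

-- ===== VERDICT (by name: the statement is the Claim_ definition above) =====
theorem total_ascend_spec : Claim_equal_total_ascend := by
  intro h_ _
  unfold Spec_total_ascend total_ascend total_ascend_alt
  exact (main_inv h_ h_.length h_.length 0 0 (by omega)).symm
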